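-- pv_equiv track=rewrite | github.com/sueszli/vector-database-benchmark | dataset/python-mutated/openGLDemo.py | ComponentFromIndex
-- ===== SOURCE A (Python) =====
-- threeto8 = [0, 73 >> 1, 146 >> 1, 219 >> 1, 292 >> 1, 365 >> 1, 438 >> 1, 255]
--
-- twoto8 = [0, 85, 170, 255]
--
-- oneto8 = [0, 255]
--
-- def ComponentFromIndex(i, nbits, shift):
--     if False:
--         while True:
--             i = 10
--     val = i >> shift & 15
--     if nbits == 1:
--         val = val & 1
--         return oneto8[val]
--     elif nbits == 2:
--         val = val & 3
--         return twoto8[val]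
--     elif nbits == 3:
--         val = val & 7
--         return threeto8[val]
--     else:
--         return 0
-- ===== SOURCE B (Python) =====
-- def ComponentFromIndex(i, nbits, shift):
--     if nbits not in (1, 2, 3):
--         return 0
--     mask = (1 << nbits) - 1
--     val = (i >> shift) & mask
--     return (val * 255 + mask // 2) // mask
-- ===== Notes on version B (the rewrite author's own statement) =====
-- stated objective: idiomatic
-- what changed: B drops the three precomputed lookup tables and computes the 8-bit component in closed form: mask=(1<<nbits)-1, val=(i>>shift)&mask, result=(val*255 + mask//2)//mask (round-to-nearest scaling), with a single guard returning 0 for nbits outside (1,2,3).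
import Mathlib
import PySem

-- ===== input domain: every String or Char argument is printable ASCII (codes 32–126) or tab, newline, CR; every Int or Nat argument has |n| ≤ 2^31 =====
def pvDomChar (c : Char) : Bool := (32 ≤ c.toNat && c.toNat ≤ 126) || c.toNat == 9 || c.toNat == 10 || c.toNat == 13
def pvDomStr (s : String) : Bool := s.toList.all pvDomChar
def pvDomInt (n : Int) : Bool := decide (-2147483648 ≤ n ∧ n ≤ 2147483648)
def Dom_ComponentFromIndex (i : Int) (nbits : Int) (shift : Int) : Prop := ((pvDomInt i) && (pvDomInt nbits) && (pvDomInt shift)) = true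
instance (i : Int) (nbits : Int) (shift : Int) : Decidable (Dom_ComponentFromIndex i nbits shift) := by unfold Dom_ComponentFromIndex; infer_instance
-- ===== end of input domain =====

-- B replaces A's three lookup tables by the closed-form rounded scaling (val*255 + mask//2)//mask (idiomatic; same cost).

-- ===== PORT A =====
def oneto8 : List Int := [0, 255]
def twoto8 : List Int := [0, 85, 170, 255]
def threeto8 : List Int :=
  [0, (73 : Int) >>> (1 : Nat), (146 : Int) >>> (1 : Nat), (219 : Int) >>> (1 : Nat),
   (292 : Int) >>> (1 : Nat), (365 : Int) >>> (1 : Nat), (438 : Int) >>> (1 : Nat), 255]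

-- the Python's 'if False: while True: i = 10' block is unreachable and is not ported
def ComponentFromIndex (i : Int) (nbits : Int) (shift : Int) : Int :=
  let val := PySem.Int.band (i >>> shift.toNat) 15
  if nbits = 1 then PySem.List.pyGetD oneto8 (PySem.Int.band val 1) 0
  else if nbits = 2 then PySem.List.pyGetD twoto8 (PySem.Int.band val 3) 0
  else if nbits = 3 then PySem.List.pyGetD threeto8 (PySem.Int.band val 7) 0
  else 0

-- ===== PORT B =====
def ComponentFromIndex_alt (i : Int) (nbits : Int) (shift : Int) : Int :=
  if ¬ (nbits = 1 ∨ nbits = 2 ∨ nbits = 3) then 0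
  else
    let mask := (1 : Int) <<< nbits.toNat - 1
    let val := PySem.Int.band (i >>> shift.toNat) mask
    PySem.Int.floordiv (val * 255 + PySem.Int.floordiv mask 2) mask

-- ===== PRECONDITION & SPEC =====
-- Pre_ excludes negative shift, where Python's 'i >> shift' raises ValueError.
def Pre_ComponentFromIndex (i : Int) (nbits : Int) (shift : Int) : Prop := 0 ≤ shift
instance (i : Int) (nbits : Int) (shift : Int) : Decidable (Pre_ComponentFromIndex i nbits shift) := by unfold Pre_ComponentFromIndex; infer_instance
def pvWitness_ComponentFromIndex : Int × Int × Int := (5, 2, 1)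

def Spec_ComponentFromIndex (i : Int) (nbits : Int) (shift : Int) (out : Int) : Prop := out = ComponentFromIndex_alt i nbits shift
instance (i : Int) (nbits : Int) (shift : Int) (out : Int) : Decidable (Spec_ComponentFromIndex i nbits shift out) := by unfold Spec_ComponentFromIndex; infer_instance

-- ===== CLAIM (what is proved, stated in full; the proofs are below) =====
def Claim_equal_ComponentFromIndex : Prop := ∀ (i : Int) (nbits : Int) (shift : Int), Dom_ComponentFromIndex i nbits shift → Pre_ComponentFromIndex i nbits shift → Spec_ComponentFromIndex i nbits shift (ComponentFromIndex i nbits shift)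

-- ===== LEMMAS AND PROOFS =====

-- 'x & (2^k - 1) = x % 2^k' for the three/four concrete masks A and B use
theorem band_15 (x : Int) : PySem.Int.band x 15 = PySem.Int.mod x 16 := by
  have h1 := Nat.and_two_pow_sub_one_eq_mod x.toNat 4
  have h2 := Nat.and_two_pow_sub_one_eq_mod (-x - 1).toNat 4
  rw [Nat.and_comm] at h2
  norm_num at h1 h2
  rw [PySem.Int.mod_eq_emod_of_pos (by norm_num : (0:Int) < 16)]
  simp only [PySem.Int.band]
  split_ifs <;> simp_all <;> omega

theorem band_7 (x : Int) : PySem.Int.band x 7 = PySem.Int.mod x 8 := by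
  have h1 := Nat.and_two_pow_sub_one_eq_mod x.toNat 3
  have h2 := Nat.and_two_pow_sub_one_eq_mod (-x - 1).toNat 3
  rw [Nat.and_comm] at h2
  norm_num at h1 h2
  rw [PySem.Int.mod_eq_emod_of_pos (by norm_num : (0:Int) < 8)]
  simp only [PySem.Int.band]
  split_ifs <;> simp_all <;> omega

theorem band_3 (x : Int) : PySem.Int.band x 3 = PySem.Int.mod x 4 := by
  have h1 := Nat.and_two_pow_sub_one_eq_mod x.toNat 2
  have h2 := Nat.and_two_pow_sub_one_eq_mod (-x - 1).toNat 2
  rw [Nat.and_comm] at h2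
  norm_num at h1 h2
  rw [PySem.Int.mod_eq_emod_of_pos (by norm_num : (0:Int) < 4)]
  simp only [PySem.Int.band]
  split_ifs <;> simp_all <;> omega

-- dropping the outer '& 15' before a finer mask
theorem mod16_mod (v : Int) (n : Int) (hn : 0 < n) (hd : n ∣ 16) :
    PySem.Int.mod (PySem.Int.mod v 16) n = PySem.Int.mod v n := by
  rw [PySem.Int.mod_eq_emod_of_pos (by norm_num : (0:Int) < 16),
      PySem.Int.mod_eq_emod_of_pos hn, PySem.Int.mod_eq_emod_of_pos hn]
  exact Int.emod_emod_of_dvd v hd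

theorem table_one (m : Int) (h0 : 0 ≤ m) (h2 : m < 2) :
    PySem.List.pyGetD oneto8 m 0 = PySem.Int.floordiv (m * 255 + PySem.Int.floordiv 1 2) 1 := by
  interval_cases m <;> decide

theorem table_two (m : Int) (h0 : 0 ≤ m) (h4 : m < 4) :
    PySem.List.pyGetD twoto8 m 0 = PySem.Int.floordiv (m * 255 + PySem.Int.floordiv 3 2) 3 := by
  interval_cases m <;> decide

theorem table_three (m : Int) (h0 : 0 ≤ m) (h8 : m < 8) :
    PySem.List.pyGetD threeto8 m 0 = PySem.Int.floordiv (m * 255 + PySem.Int.floordiv 7 2) 7 := by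
  interval_cases m <;> decide

-- ===== VERDICT (by name: the statement is the Claim_ definition above) =====
theorem ComponentFromIndex_spec : Claim_equal_ComponentFromIndex := by
  intro i nbits shift _ _
  unfold Spec_ComponentFromIndex ComponentFromIndex ComponentFromIndex_alt
  set v : Int := i >>> shift.toNat with hv
  by_cases h1 : nbits = 1
  · subst h1
    simp only [if_pos rfl, reduceIte, or_true, true_or, not_true_eq_false]
    have hm : ((1 : Int) <<< (1 : Int).toNat - 1) = 1 := by decide
    rw [hm, band_15, PySem.Int.band_one, PySem.Int.band_one,
        mod16_mod v 2 (by norm_num) (by norm_num)]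
    exact table_one _ (PySem.Int.mod_nonneg v (by norm_num)) (PySem.Int.mod_lt v (by norm_num))
  · by_cases h2 : nbits = 2
    · subst h2
      simp only [if_pos rfl, reduceIte, or_true, true_or, not_true_eq_false]
      have hm : ((1 : Int) <<< (2 : Int).toNat - 1) = 3 := by decide
      rw [hm, band_15, band_3, band_3, mod16_mod v 4 (by norm_num) (by norm_num)]
      exact table_two _ (PySem.Int.mod_nonneg v (by norm_num)) (PySem.Int.mod_lt v (by norm_num))
    · by_cases h3 : nbits = 3
      · subst h3
        simp only [if_pos rfl, reduceIte, or_true, true_or, not_true_eq_false]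
        have hm : ((1 : Int) <<< (3 : Int).toNat - 1) = 7 := by decide
        rw [hm, band_15, band_7, band_7, mod16_mod v 8 (by norm_num) (by norm_num)]
        exact table_three _ (PySem.Int.mod_nonneg v (by norm_num)) (PySem.Int.mod_lt v (by norm_num))
      · simp [h1, h2, h3]
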